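-- pv_equiv track=rewrite | github.com/NaamaMika/boss-sniffer | step2_manager.py | indexs_port
-- ===== SOURCE A (Python) =====
-- def indexs_port(update_html_code):
--     """Find two indexs to set the information of the ports
--     :param update_html_code: html code
--     :return: two indexs
--     """
--     index_keys = 0
--     index_values = 0
--     for i in range(len(update_html_code)):
--         if "labels: %%PORTS_KEYS%%," in update_html_code[i]:
--             index_keys = i
--         if "%%PORTS_VALUES%%" in update_html_code[i]:
--             index_values = i
--     return index_keys, index_values
-- ===== SOURCE B (Python) =====
-- def indexs_port(update_html_code):
--     """Find two indexs to set the information of the ports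
--     :param update_html_code: html code
--     :return: two indexs
--     """
--     index_keys = 0
--     index_values = 0
--     found_keys = False
--     found_values = False
--     for i in range(len(update_html_code) - 1, -1, -1):
--         line = update_html_code[i]
--         if not found_keys and "labels: %%PORTS_KEYS%%," in line:
--             index_keys = i
--             found_keys = True
--         if not found_values and "%%PORTS_VALUES%%" in line:
--             index_values = i
--             found_values = True
--         if found_keys and found_values:
--             break
--     return index_keys, index_values
-- ===== Notes on version B (the rewrite author's own statement) =====
-- stated objective: alternative
-- what changed: B scans the lines backward with found-flags and breaks as soon as both markers are located, so each marker's first reverse hit is its last forward occurrence and the tail of the list is not revisited; A always scans every line forward overwriting the indices.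
import Mathlib
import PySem

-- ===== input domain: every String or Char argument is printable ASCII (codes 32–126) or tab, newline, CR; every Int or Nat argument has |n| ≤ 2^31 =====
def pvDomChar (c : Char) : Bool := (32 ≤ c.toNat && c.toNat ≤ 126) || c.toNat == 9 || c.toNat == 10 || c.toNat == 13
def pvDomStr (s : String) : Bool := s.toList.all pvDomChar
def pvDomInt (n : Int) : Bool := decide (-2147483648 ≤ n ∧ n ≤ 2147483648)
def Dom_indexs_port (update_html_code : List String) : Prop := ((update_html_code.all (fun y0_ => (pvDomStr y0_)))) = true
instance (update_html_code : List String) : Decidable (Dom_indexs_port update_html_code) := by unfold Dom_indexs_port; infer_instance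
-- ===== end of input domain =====

-- ===== PORT A =====
-- B reverses the traversal with early exit once both markers are found; forward A always scans all lines. Equivalence of return values is proved.
def stepA (xs : List String) (acc : Int × Int) (i : Int) : Int × Int :=
  let line := PySem.List.pyGetD xs i ""
  ( if PySem.Str.isIn "labels: %%PORTS_KEYS%%," line then i else acc.1,
    if PySem.Str.isIn "%%PORTS_VALUES%%" line then i else acc.2 )

def indexs_port (update_html_code : List String) : Int × Int :=
  (PySem.List.pyRange 0 (PySem.List.len update_html_code) 1).foldl (stepA update_html_code) (0, 0)

-- ===== PORT B =====
-- backward loop: i counts down; `n` is the number of indices still to visit (current index is n-1); break when both flags set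
def altGo (xs : List String) : Nat → Int → Bool → Int → Bool → Int × Int
  | 0, ik, _, iv, _ => (ik, iv)
  | Nat.succ j, ik, fk, iv, fv =>
    let line := PySem.List.pyGetD xs (j : Int) ""
    let ik' := if !fk && PySem.Str.isIn "labels: %%PORTS_KEYS%%," line then (j : Int) else ik
    let fk' := if !fk && PySem.Str.isIn "labels: %%PORTS_KEYS%%," line then true else fk
    let iv' := if !fv && PySem.Str.isIn "%%PORTS_VALUES%%" line then (j : Int) else iv
    let fv' := if !fv && PySem.Str.isIn "%%PORTS_VALUES%%" line then true else fv
    if fk' && fv' then (ik', iv') else altGo xs j ik' fk' iv' fv'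

def indexs_port_alt (update_html_code : List String) : Int × Int :=
  altGo update_html_code update_html_code.length 0 false 0 false

-- ===== PRECONDITION & SPEC =====
def Spec_indexs_port (update_html_code : List String) (out : Int × Int) : Prop := out = indexs_port_alt update_html_code
instance (update_html_code : List String) (out : Int × Int) : Decidable (Spec_indexs_port update_html_code out) := by unfold Spec_indexs_port; infer_instance

-- ===== CLAIM (what is proved, stated in full; the proofs are below) =====
def Claim_equal_indexs_port : Prop := ∀ (update_html_code : List String), Dom_indexs_port update_html_code → Spec_indexs_port update_html_code (indexs_port update_html_code)

-- ===== LEMMAS AND PROOFS =====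

-- the largest index i < n whose line satisfies p, with default a when none exists
def lastBelowD (p : String → Bool) (xs : List String) : Nat → Int → Int
  | 0, a => a
  | Nat.succ j, a => if p (PySem.List.pyGetD xs (j : Int) "") then (j : Int) else lastBelowD p xs j a

theorem foldA_eq (xs : List String) (n : Nat) (a b : Int) :
    (PySem.List.pyRange 0 (n : Int) 1).foldl (stepA xs) (a, b) =
      (lastBelowD (fun s => PySem.Str.isIn "labels: %%PORTS_KEYS%%," s) xs n a,
       lastBelowD (fun s => PySem.Str.isIn "%%PORTS_VALUES%%" s) xs n b) := by
  induction n with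
  | zero => simp [lastBelowD]
  | succ j ih =>
    have hsplit : PySem.List.pyRange 0 ((j : Nat) + 1 : Int) 1 =
        PySem.List.pyRange 0 (j : Int) 1 ++ [(j : Int)] :=
      PySem.List.pyRange_one_succ_right (by positivity)
    rw [show ((Nat.succ j : Nat) : Int) = ((j : Nat) : Int) + 1 by push_cast; ring, hsplit,
      List.foldl_append, ih]
    simp only [List.foldl_cons, List.foldl_nil, stepA, lastBelowD]

theorem altGo_eq (xs : List String) (n : Nat) (ik iv : Int) (fk fv : Bool) :
    altGo xs n ik fk iv fv =
      ((if fk then ik else lastBelowD (fun s => PySem.Str.isIn "labels: %%PORTS_KEYS%%," s) xs n ik),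
       (if fv then iv else lastBelowD (fun s => PySem.Str.isIn "%%PORTS_VALUES%%" s) xs n iv)) := by
  induction n generalizing ik iv fk fv with
  | zero => cases fk <;> cases fv <;> simp [altGo, lastBelowD]
  | succ j ih =>
    simp only [altGo, lastBelowD]
    cases fk <;> cases fv <;>
      by_cases hK : PySem.Str.isIn "labels: %%PORTS_KEYS%%," (PySem.List.pyGetD xs (j : Int) "") = true <;>
      by_cases hV : PySem.Str.isIn "%%PORTS_VALUES%%" (PySem.List.pyGetD xs (j : Int) "") = true <;>
        simp_all [ih]

-- ===== VERDICT (by name: the statement is the Claim_ definition above) =====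
theorem indexs_port_spec : Claim_equal_indexs_port := by
  intro xs _
  unfold Spec_indexs_port indexs_port indexs_port_alt
  rw [show PySem.List.len xs = (xs.length : Int) from PySem.List.len_eq xs, foldA_eq, altGo_eq]
  simp
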